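-- pv_equiv track=rewrite | github.com/sweedy12/CATCHPHRASE | snowclone_classification/Measures.py | longest_common_sequence_with_wildcard
-- ===== SOURCE A (Python) =====
-- def add_wildcard_words(lst1,lst2,replaces):
--     """
--     This method gets 2 lists: one containing words with wildcards, and the other contains all words.
--     we replace each
--     :param lst1:
--     :param lst:
--     :param replaces:
--     :return:
--     """
--     new_X = []
--     i = 0
--     l = len(lst1)
--     cur_replacs = 0
--     first_encounter = True
--     j = 0
--     while (i < l):
--         if (j >= len(lst2)):
--             if (lst1[i] != "*"):
--                 new_X.append(lst1[i])
--             i+=1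
--         elif lst1[i] != "*":
--             new_X.append(lst1[i])
--             i+= 1
--         else:
--             cur_replacs = 0
--             #if theres nothing prior to the wildcard, add
--             if (i == 0):
--                 while (cur_replacs < replaces and j < len(lst2) and (i>= l-1 or lst1[i+1] != lst2[j])):
--                     cur_replacs += 1
--                     new_X.append(lst2[j])
--                     j+=1
--                 i+=1
--             else:
--                 #checking if we can find the starting j:
--                 while (j < len(lst2) and lst2[j] != lst1[i-1]):
--                     j+=1
--                 j+=1
--                 while (cur_replacs < replaces and j < len(lst2) and (i >=l-1 or lst1[i+1] != lst2[j])):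
--                     cur_replacs += 1
--                     new_X.append(lst2[j])
--                     j+=1
--                 i+=1
--
--
--     return new_X
--
-- def longest_common_sequence_with_wildcard(X,Y,replaces):
--     """
--         this method dins the longest common sequence between X and Y
--         :param X: a list of strings
--         :param Y: a list of strings
--         :return:
--         """
--     max_val = 0
--     highest_count = 0
--     X = add_wildcard_words(X,Y,replaces)
--     n = len(X)
--     m = len(Y)
--     table = [[0 for k in range(m + 1)] for l in range(n + 1)]
--     for i in range(n + 1):
--         if (i>=1 and X[i-1]=="*"):
--             highest_count += replaces - 1
--         for j in range(m + 1):
--             cur_val = 0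
--             if (i == 0 or j == 0):
--                 table[i][j] = 0
--             elif (X[i - 1] == Y[j - 1]):
--                 cur_val = table[i - 1][j - 1] + 1
--                 table[i][j] = cur_val
--
--             else:
--                 cur_val = max(table[i - 1][j], table[i][j - 1])
--                 table[i][j] = cur_val
--         max_val = max(cur_val, max_val)
--     return max_val
-- ===== SOURCE B (Python) =====
-- def add_wildcard_words(lst1,lst2,replaces):
--     new_X = []
--     i = 0
--     l = len(lst1)
--     cur_replacs = 0
--     first_encounter = True
--     j = 0
--     while (i < l):
--         if (j >= len(lst2)):
--             if (lst1[i] != "*"):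
--                 new_X.append(lst1[i])
--             i+=1
--         elif lst1[i] != "*":
--             new_X.append(lst1[i])
--             i+= 1
--         else:
--             cur_replacs = 0
--             if (i == 0):
--                 while (cur_replacs < replaces and j < len(lst2) and (i>= l-1 or lst1[i+1] != lst2[j])):
--                     cur_replacs += 1
--                     new_X.append(lst2[j])
--                     j+=1
--                 i+=1
--             else:
--                 while (j < len(lst2) and lst2[j] != lst1[i-1]):
--                     j+=1
--                 j+=1
--                 while (cur_replacs < replaces and j < len(lst2) and (i >=l-1 or lst1[i+1] != lst2[j])):
--                     cur_replacs += 1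
--                     new_X.append(lst2[j])
--                     j+=1
--                 i+=1
--     return new_X
--
-- def longest_common_sequence_with_wildcard(X, Y, replaces):
--     # demand-driven LCS: the lcs(i,j) recursion evaluated lazily with an explicit
--     # two-phase stack and a memo dict, instead of filling the whole bottom-up table
--     Xw = add_wildcard_words(X, Y, replaces)
--     n = len(Xw)
--     m = len(Y)
--     memo = {}
--     stack = [(n, m, False)]
--     while stack:
--         i, j, ready = stack.pop()
--         if (i, j) in memo:
--             continue
--         if i == 0 or j == 0:
--             memo[(i, j)] = 0
--         elif ready:
--             if Xw[i - 1] == Y[j - 1]: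
--                 memo[(i, j)] = memo[(i - 1, j - 1)] + 1
--             else:
--                 memo[(i, j)] = max(memo[(i - 1, j)], memo[(i, j - 1)])
--         else:
--             stack.append((i, j, True))
--             if Xw[i - 1] == Y[j - 1]:
--                 stack.append((i - 1, j - 1, False))
--             else:
--                 stack.append((i - 1, j, False))
--                 stack.append((i, j - 1, False))
--     return memo[(n, m)]
-- ===== Notes on version B (the rewrite author's own statement) =====
-- stated objective: alternative
-- what changed: Replaces A's bottom-up (n+1)x(m+1) DP table (with its per-row max fold and dead highest_count accumulator) by a demand-driven evaluation of the lcs(i,j) recursion: an explicit two-phase stack with a memo dict computes only the cells the goal cell (n,m) actually depends on, returning memo[(n,m)].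
import Mathlib
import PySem

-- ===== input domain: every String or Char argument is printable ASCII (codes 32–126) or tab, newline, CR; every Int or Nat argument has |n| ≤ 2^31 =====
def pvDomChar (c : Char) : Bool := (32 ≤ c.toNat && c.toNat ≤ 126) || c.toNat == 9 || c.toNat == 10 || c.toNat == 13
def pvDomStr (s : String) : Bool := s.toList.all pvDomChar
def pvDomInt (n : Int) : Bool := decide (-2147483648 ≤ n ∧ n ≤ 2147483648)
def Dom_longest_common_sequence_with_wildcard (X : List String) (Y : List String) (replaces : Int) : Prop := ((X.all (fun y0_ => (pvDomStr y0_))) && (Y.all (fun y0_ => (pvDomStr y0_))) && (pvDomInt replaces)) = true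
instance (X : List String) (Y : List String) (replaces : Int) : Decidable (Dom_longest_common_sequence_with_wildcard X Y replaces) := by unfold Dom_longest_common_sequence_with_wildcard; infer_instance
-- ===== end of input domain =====

-- B replaces A's bottom-up (n+1)×(m+1) DP table (and its per-row max fold and dead
-- highest_count accumulator) by a demand-driven evaluation of the lcs(i,j) recursion:
-- an explicit two-phase stack plus a memo dict, returning memo[(n,m)] ('alternative').

-- ===== PORT A =====
-- add_wildcard_words: Python while-loops become recursion on the increasing indices i / j.
-- All list subscripts A performs are in range, where pyGetD _ _ "" is exact (= Python lst[k]).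

-- while (j < len(lst2) and lst2[j] != lst1[i-1]): j += 1
def awFind (lst2 : List String) (target : String) (j : Nat) : Nat :=
  if _h : j < lst2.length ∧ PySem.List.pyGetD lst2 (j : Int) "" ≠ target then
    awFind lst2 target (j + 1)
  else j
termination_by lst2.length - j

-- while (cur_replacs < replaces and j < len(lst2) and (i >= l-1 or lst1[i+1] != lst2[j])): …
-- (i ≥ l-1 over Python ints is l ≤ i+1 over Nat, since l ≥ 1 whenever this loop runs)
def awRepl (lst1 lst2 : List String) (replaces : Int) (i l : Nat) (cur_replacs : Int)
    (newX : List String) (j : Nat) : List String × Nat :=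
  if _h : cur_replacs < replaces ∧ j < lst2.length ∧
      (l ≤ i + 1 ∨ PySem.List.pyGetD lst1 ((i : Int) + 1) "" ≠ PySem.List.pyGetD lst2 (j : Int) "") then
    awRepl lst1 lst2 replaces i l (cur_replacs + 1)
      (newX ++ [PySem.List.pyGetD lst2 (j : Int) ""]) (j + 1)
  else (newX, j)
termination_by lst2.length - j

-- the outer while (i < l), branch for branch
def awMain (lst1 lst2 : List String) (replaces : Int) (i : Nat) (newX : List String) (j : Nat) :
    List String :=
  if _hi : i < lst1.length then
    if lst2.length ≤ j then
      awMain lst1 lst2 replaces (i + 1)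
        (if PySem.List.pyGetD lst1 (i : Int) "" ≠ "*" then
           newX ++ [PySem.List.pyGetD lst1 (i : Int) ""] else newX) j
    else if PySem.List.pyGetD lst1 (i : Int) "" ≠ "*" then
      awMain lst1 lst2 replaces (i + 1) (newX ++ [PySem.List.pyGetD lst1 (i : Int) ""]) j
    else if i = 0 then
      let r := awRepl lst1 lst2 replaces i lst1.length 0 newX j
      awMain lst1 lst2 replaces (i + 1) r.1 r.2
    else
      let j1 := awFind lst2 (PySem.List.pyGetD lst1 ((i : Int) - 1) "") j
      let r := awRepl lst1 lst2 replaces i lst1.length 0 newX (j1 + 1)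
      awMain lst1 lst2 replaces (i + 1) r.1 r.2
  else newX
termination_by lst1.length - i

def add_wildcard_words (lst1 lst2 : List String) (replaces : Int) : List String :=
  awMain lst1 lst2 replaces 0 [] 0

-- the mutable 2D table is represented as an update function Int → Int → Int (initially all 0,
-- exactly the allocated zero table); every Python read/write is at these integer indices
def lcsUpd (t : Int → Int → Int) (i j v : Int) : Int → Int → Int :=
  fun i' j' => if i' = i ∧ j' = j then v else t i' j'

-- body of "for j in range(m + 1)"; state = (table, cur_val)
def lcsInner (Xp Y : List String) (i : Int) (st : (Int → Int → Int) × Int) (j : Int) :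
    (Int → Int → Int) × Int :=
  if i = 0 ∨ j = 0 then (lcsUpd st.1 i j 0, 0)
  else if PySem.List.pyGetD Xp (i - 1) "" = PySem.List.pyGetD Y (j - 1) "" then
    -- cur_val = table[i-1][j-1] + 1 (written out in both components)
    (lcsUpd st.1 i j (st.1 (i - 1) (j - 1) + 1), st.1 (i - 1) (j - 1) + 1)
  else
    -- cur_val = max(table[i-1][j], table[i][j-1])
    (lcsUpd st.1 i j (max (st.1 (i - 1) j) (st.1 i (j - 1))),
      max (st.1 (i - 1) j) (st.1 i (j - 1)))

-- body of "for i in range(n + 1)"; state = (table, max_val, highest_count)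
def lcsOuter (Xp Y : List String) (replaces : Int) (st : (Int → Int → Int) × Int × Int)
    (i : Int) : (Int → Int → Int) × Int × Int :=
  let highest_count :=
    if 1 ≤ i ∧ PySem.List.pyGetD Xp (i - 1) "" = "*" then st.2.2 + (replaces - 1) else st.2.2
  let r := (PySem.List.pyRange 0 ((Y.length : Int) + 1)).foldl (lcsInner Xp Y i) (st.1, 0)
  (r.1, max r.2 st.2.1, highest_count)

def longest_common_sequence_with_wildcard (X : List String) (Y : List String) (replaces : Int) :
    Int :=
  let Xp := add_wildcard_words X Y replaces
  ((PySem.List.pyRange 0 ((Xp.length : Int) + 1)).foldl (lcsOuter Xp Y replaces)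
      ((fun _ _ => 0), 0, 0)).2.1

-- ===== PORT B =====
-- Source B's while-loop over the explicit stack; Lean list head = Python stack top (list end).
-- Python's memo[(i-1,j-1)] etc. are read with (get? _).getD 0: the key is always present
-- when read (proved via the stack invariant below), so the default is never produced.
-- Termination: each step strictly decreases Σ over the stack of (2 - stage)·5^(i+j).
def lcsLoop (Xw Y : List String) (stack : List (Nat × Nat × Bool))
    (memo : PySem.Dict (Nat × Nat) Int) : PySem.Dict (Nat × Nat) Int :=
  match stack with
  | [] => memo
  | (i, j, ready) :: rest =>
    if (memo.get? (i, j)).isSome then lcsLoop Xw Y rest memo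
    else if h0 : i = 0 ∨ j = 0 then lcsLoop Xw Y rest (memo.insert (i, j) 0)
    else if ready then
      if PySem.List.pyGetD Xw ((i : Int) - 1) "" = PySem.List.pyGetD Y ((j : Int) - 1) "" then
        lcsLoop Xw Y rest (memo.insert (i, j) ((memo.get? (i - 1, j - 1)).getD 0 + 1))
      else
        lcsLoop Xw Y rest (memo.insert (i, j)
          (max ((memo.get? (i - 1, j)).getD 0) ((memo.get? (i, j - 1)).getD 0)))
    else
      if PySem.List.pyGetD Xw ((i : Int) - 1) "" = PySem.List.pyGetD Y ((j : Int) - 1) "" then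
        lcsLoop Xw Y ((i - 1, j - 1, false) :: (i, j, true) :: rest) memo
      else
        lcsLoop Xw Y ((i, j - 1, false) :: (i - 1, j, false) :: (i, j, true) :: rest) memo
termination_by (stack.map (fun f => (if f.2.2 then 1 else 2) * 5 ^ (f.1 + f.2.1))).sum
decreasing_by
  · simp only [List.map_cons, List.sum_cons]
    have : 0 < (if ready then 1 else 2) * 5 ^ (i + j) := by positivity
    omega
  · simp only [List.map_cons, List.sum_cons]
    have : 0 < (if ready then 1 else 2) * 5 ^ (i + j) := by positivity
    omega
  · simp only [List.map_cons, List.sum_cons]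
    have : 0 < (if ready then 1 else 2) * 5 ^ (i + j) := by positivity
    omega
  · simp only [List.map_cons, List.sum_cons]
    have : 0 < (if ready then 1 else 2) * 5 ^ (i + j) := by positivity
    omega
  · -- match expand
    have hrf : ready = false := by simp_all
    subst hrf
    simp only [not_or] at h0
    simp only [List.map_cons, List.sum_cons]
    have he : i + j = (i - 1) + (j - 1) + 2 := by omega
    have hp : 5 ^ (i + j) = 25 * 5 ^ ((i - 1) + (j - 1)) := by rw [he]; ring
    have hpos : 0 < 5 ^ ((i - 1) + (j - 1)) := by positivity
    norm_num [hp]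
    omega
  · -- mismatch expand
    have hrf : ready = false := by simp_all
    subst hrf
    simp only [not_or] at h0
    simp only [List.map_cons, List.sum_cons]
    have he1 : i + (j - 1) + 1 = i + j := by omega
    have hp1 : 5 ^ (i + j) = 5 * 5 ^ (i + (j - 1)) := by rw [← he1]; ring
    have hp2 : 5 ^ ((i - 1) + j) = 5 ^ (i + (j - 1)) := by congr 1; omega
    have hpos : 0 < 5 ^ (i + (j - 1)) := by positivity
    norm_num [hp1, hp2]
    omega

def longest_common_sequence_with_wildcard_alt (X : List String) (Y : List String)
    (replaces : Int) : Int :=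
  let Xw := add_wildcard_words X Y replaces
  let n := Xw.length
  let m := Y.length
  let memo := lcsLoop Xw Y [(n, m, false)] PySem.Dict.empty
  (memo.get? (n, m)).getD 0   -- memo[(n, m)]; always present when the loop ends

-- ===== PRECONDITION & SPEC =====
def Spec_longest_common_sequence_with_wildcard (X : List String) (Y : List String) (replaces : Int) (out : Int) : Prop := out = longest_common_sequence_with_wildcard_alt X Y replaces
instance (X : List String) (Y : List String) (replaces : Int) (out : Int) : Decidable (Spec_longest_common_sequence_with_wildcard X Y replaces out) := by unfold Spec_longest_common_sequence_with_wildcard; infer_instance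

-- ===== CLAIM (what is proved, stated in full; the proofs are below) =====
def Claim_equal_longest_common_sequence_with_wildcard : Prop := ∀ (X : List String) (Y : List String) (replaces : Int), Dom_longest_common_sequence_with_wildcard X Y replaces → Spec_longest_common_sequence_with_wildcard X Y replaces (longest_common_sequence_with_wildcard X Y replaces)

-- ===== LEMMAS AND PROOFS =====

-- the pure LCS-length recursion both programs compute
def Lrec (Xw Y : List String) : Nat → Nat → Int
  | 0, _ => 0
  | _ + 1, 0 => 0
  | i + 1, j + 1 =>
      if Xw.getD i "" = Y.getD j "" then Lrec Xw Y i j + 1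
      else max (Lrec Xw Y i (j + 1)) (Lrec Xw Y (i + 1) j)
termination_by i j => (i, j)

lemma Lrec_left_zero (Xw Y : List String) (j : Nat) : Lrec Xw Y 0 j = 0 := by
  simp [Lrec]

lemma Lrec_right_zero (Xw Y : List String) (i : Nat) : Lrec Xw Y i 0 = 0 := by
  cases i <;> simp [Lrec]

-- reference form of one DP row: consume zip(Y, prev, prev[1:]) carrying the last emitted value
def rowR (x : String) : List (String × Int × Int) → Int → List Int
  | [], _ => []
  | p :: ps, c =>
      (if x = p.1 then p.2.1 + 1 else max p.2.2 c) ::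
        rowR x ps (if x = p.1 then p.2.1 + 1 else max p.2.2 c)

def newRow (x : String) (Y : List String) (prev : List Int) : List Int :=
  0 :: rowR x (Y.zip (prev.zip prev.tail)) 0

-- the sequence of DP rows (row after processing a prefix of Xw)
def rowsA (Y : List String) (pref : List String) : List Int :=
  pref.foldl (fun p x => newRow x Y p) (List.replicate (Y.length + 1) 0)

lemma lcsUpd_same {t : Int → Int → Int} {i j v : Int} : lcsUpd t i j v i j = v :=
  if_pos ⟨rfl, rfl⟩

lemma lcsUpd_ne {t : Int → Int → Int} {i j v i' j' : Int} (h : ¬(i' = i ∧ j' = j)) :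
    lcsUpd t i j v i' j' = t i' j' := if_neg h

lemma replicate_getD (n k : Nat) : (List.replicate n (0 : Int)).getD k 0 = 0 := by
  rw [List.getD_eq_getElem?_getD, List.getElem?_replicate]
  split_ifs <;> rfl

lemma lcsOuter_fst (Xp Y : List String) (replaces : Int) (st : (Int → Int → Int) × Int × Int)
    (i : Int) :
    (lcsOuter Xp Y replaces st i).1
      = ((PySem.List.pyRange 0 ((Y.length : Int) + 1)).foldl (lcsInner Xp Y i) (st.1, 0)).1 := rfl

lemma lcsOuter_max (Xp Y : List String) (replaces : Int) (st : (Int → Int → Int) × Int × Int)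
    (i : Int) :
    (lcsOuter Xp Y replaces st i).2.1
      = max ((PySem.List.pyRange 0 ((Y.length : Int) + 1)).foldl (lcsInner Xp Y i) (st.1, 0)).2
          st.2.1 := rfl

lemma length_rowR (x : String) (z : List (String × Int × Int)) (c : Int) :
    (rowR x z c).length = z.length := by
  induction z generalizing c with
  | nil => rfl
  | cons p ps ih => simp [rowR, ih]

lemma rowR_getD_succ (x : String) (z : List (String × Int × Int)) (c : Int) (j : Nat)
    (hj : j < z.length) :
    (c :: rowR x z c).getD (j + 1) 0 =
      if x = (z[j]).1 then (z[j]).2.1 + 1 else max (z[j]).2.2 ((c :: rowR x z c).getD j 0) := by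
  induction z generalizing c j with
  | nil => simp at hj
  | cons p ps ih =>
    cases j with
    | zero => simp [rowR]
    | succ q =>
      have hq : q < ps.length := by simpa using hj
      have := ih (if x = p.1 then p.2.1 + 1 else max p.2.2 c) q hq
      simpa [rowR] using this

lemma length_newRow (x : String) (Y : List String) (prev : List Int)
    (h : prev.length = Y.length + 1) :
    (newRow x Y prev).length = Y.length + 1 := by
  simp [newRow, length_rowR, h]

lemma zip3_getElem (Y : List String) (prev : List Int) (h : prev.length = Y.length + 1)
    (j : Nat) (hj : j < Y.length) :
    ∀ (hz : j < (Y.zip (prev.zip prev.tail)).length),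
      (Y.zip (prev.zip prev.tail))[j] = (Y[j], prev.getD j 0, prev.getD (j + 1) 0) := by
  intro hz
  have h1 : j < prev.length := by omega
  have h3 : j + 1 < prev.length := by omega
  simp [List.getElem_zip, List.getElem_tail, List.getD_eq_getElem?_getD, h1, h3]

lemma newRow_getD_succ (x : String) (Y : List String) (prev : List Int)
    (h : prev.length = Y.length + 1) (j : Nat) (hj : j < Y.length) :
    (newRow x Y prev).getD (j + 1) 0 =
      if x = Y[j] then prev.getD j 0 + 1
      else max (prev.getD (j + 1) 0) ((newRow x Y prev).getD j 0) := by
  have hz : j < (Y.zip (prev.zip prev.tail)).length := by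
    simp [h]; omega
  have := rowR_getD_succ x (Y.zip (prev.zip prev.tail)) 0 j hz
  rw [zip3_getElem Y prev h j hj hz] at this
  simpa [newRow] using this

-- the row invariant that makes table[i][m] monotone in i
def RowInv (prev : List Int) : Prop :=
  prev.getD 0 0 = 0 ∧ ∀ j : Nat, j + 1 < prev.length → prev.getD (j + 1) 0 ≤ prev.getD j 0 + 1

lemma newRow_getD_zero (x : String) (Y : List String) (prev : List Int) :
    (newRow x Y prev).getD 0 0 = 0 := by simp [newRow]

lemma newRow_mono (x : String) (Y : List String) (prev : List Int)
    (h : prev.length = Y.length + 1) (hinv : RowInv prev) :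
    ∀ j : Nat, j ≤ Y.length → prev.getD j 0 ≤ (newRow x Y prev).getD j 0 := by
  intro j hj
  cases j with
  | zero =>
    rw [hinv.1, newRow_getD_zero]
  | succ q =>
    have hq : q < Y.length := by omega
    rw [newRow_getD_succ x Y prev h q hq]
    split_ifs with hx
    · have := hinv.2 q (by omega)
      omega
    · exact le_max_left _ _

lemma newRow_inv (x : String) (Y : List String) (prev : List Int)
    (h : prev.length = Y.length + 1) (hinv : RowInv prev) :
    RowInv (newRow x Y prev) := by
  constructor
  · exact newRow_getD_zero x Y prev
  · intro j hj
    rw [length_newRow x Y prev h] at hj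
    have hjY : j < Y.length := by omega
    rw [newRow_getD_succ x Y prev h j hjY]
    have hmono := newRow_mono x Y prev h hinv j (by omega)
    split_ifs with hx
    · omega
    · have h1 : prev.getD (j + 1) 0 ≤ prev.getD j 0 + 1 := hinv.2 j (by omega)
      have : prev.getD (j+1) 0 ≤ (newRow x Y prev).getD j 0 + 1 := by omega
      omega

lemma rowsA_nil (Y : List String) : rowsA Y [] = List.replicate (Y.length + 1) 0 := rfl

lemma rowsA_length (Y : List String) (pref : List String) :
    (rowsA Y pref).length = Y.length + 1 := by
  unfold rowsA
  induction pref using List.reverseRecOn with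
  | nil => simp
  | append_singleton xs x ih =>
    rw [List.foldl_append]
    exact length_newRow _ _ _ ih

lemma rowsA_inv (Y : List String) (pref : List String) : RowInv (rowsA Y pref) := by
  unfold rowsA
  induction pref using List.reverseRecOn with
  | nil =>
    refine ⟨?_, ?_⟩ <;> simp only [List.foldl_nil]
    · exact replicate_getD _ _
    · intro j _
      rw [replicate_getD, replicate_getD]
      omega
  | append_singleton xs x ih =>
    rw [List.foldl_append]
    exact newRow_inv _ _ _ (by simpa [rowsA] using rowsA_length Y xs) ih

lemma rowsA_take_succ (Y Xp : List String) (k : Nat) (hk : k < Xp.length) :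
    rowsA Y (Xp.take (k + 1)) = newRow (Xp.getD k "") Y (rowsA Y (Xp.take k)) := by
  have : Xp.take (k + 1) = Xp.take k ++ [Xp[k]] := by
    rw [List.take_add_one, List.getElem?_eq_getElem hk]; rfl
  rw [this]
  unfold rowsA
  rw [List.foldl_append]
  simp [List.getD_eq_getElem?_getD, hk]

-- the inner loop for a row i ≥ 1: characterises the table and cur_val it produces
lemma inner_row (Xp Y : List String) (ki : Nat) (hki1 : 1 ≤ ki)
    (prev : List Int) (hlen : prev.length = Y.length + 1)
    (t0 : Int → Int → Int)
    (hprev : ∀ j : Nat, j ≤ Y.length → t0 ((ki : Int) - 1) (j : Int) = prev.getD j 0) :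
    ∀ jc : Nat, jc ≤ Y.length + 1 →
      (∀ i' j' : Int, i' ≠ (ki : Int) →
        ((PySem.List.pyRange 0 (jc : Int)).foldl (lcsInner Xp Y (ki : Int)) (t0, 0)).1 i' j'
          = t0 i' j') ∧
      (∀ j : Nat, j < jc →
        ((PySem.List.pyRange 0 (jc : Int)).foldl (lcsInner Xp Y (ki : Int)) (t0, 0)).1
            (ki : Int) (j : Int)
          = (newRow (Xp.getD (ki - 1) "") Y prev).getD j 0) ∧
      ((PySem.List.pyRange 0 (jc : Int)).foldl (lcsInner Xp Y (ki : Int)) (t0, 0)).2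
        = (if jc = 0 then 0 else (newRow (Xp.getD (ki - 1) "") Y prev).getD (jc - 1) 0) := by
  intro jc
  induction jc with
  | zero =>
    intro _
    rw [PySem.List.pyRange_one_eq_nil (by norm_num)]
    exact ⟨fun _ _ _ => rfl, fun j hj => absurd hj (by omega), rfl⟩
  | succ q ih =>
    intro hq1
    have ihq := ih (by omega)
    have hsplit : PySem.List.pyRange 0 ((q : Int) + 1)
        = PySem.List.pyRange 0 (q : Int) ++ [(q : Int)] :=
      PySem.List.pyRange_one_succ_right (by positivity)
    have hcast : ((q + 1 : Nat) : Int) = (q : Int) + 1 := by push_cast; ring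
    rw [hcast, hsplit, List.foldl_append]
    set r := (PySem.List.pyRange 0 (q : Int)).foldl (lcsInner Xp Y (ki : Int)) (t0, 0) with hr
    have hki0 : ((ki : Int)) ≠ 0 := by omega
    have hxi : PySem.List.pyGetD Xp ((ki : Int) - 1) "" = Xp.getD (ki - 1) "" := by
      have : ((ki : Int) - 1) = ((ki - 1 : Nat) : Int) := by omega
      rw [this, PySem.List.pyGetD_natCast]
    cases q with
    | zero =>
      -- j = 0 iteration
      simp only [List.foldl_cons, List.foldl_nil]
      rw [show r = (t0, 0) by rw [hr, PySem.List.pyRange_one_eq_nil (by norm_num)]; rfl]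
      unfold lcsInner
      rw [if_pos (Or.inr (by norm_num : ((0 : Nat) : Int) = 0))]
      refine ⟨?_, ?_, ?_⟩
      · intro i' j' hne
        exact lcsUpd_ne (fun hh => hne hh.1)
      · intro j hj
        have : j = 0 := by omega
        subst this
        exact lcsUpd_same.trans (newRow_getD_zero _ _ _).symm
      · simpa using (newRow_getD_zero (Xp.getD (ki - 1) "") Y prev).symm
    | succ p =>
      -- j = p + 1 ≥ 1 iteration
      have hpY : p < Y.length := by omega
      simp only [List.foldl_cons, List.foldl_nil]
      obtain ⟨hA, hB, hC⟩ := ihq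
      have hj0 : ((p + 1 : Nat) : Int) ≠ 0 := by push_cast; omega
      have hyj : PySem.List.pyGetD Y (((p + 1 : Nat) : Int) - 1) "" = Y[p] := by
        have : (((p + 1 : Nat) : Int) - 1) = ((p : Nat) : Int) := by push_cast; ring
        rw [this, PySem.List.pyGetD_natCast, List.getD_eq_getElem?_getD,
          List.getElem?_eq_getElem hpY]
        rfl
      have hread1 : r.1 ((ki : Int) - 1) (((p + 1 : Nat) : Int) - 1) = prev.getD p 0 := by
        have hne : (ki : Int) - 1 ≠ (ki : Int) := by omega
        have : (((p + 1 : Nat) : Int) - 1) = ((p : Nat) : Int) := by push_cast; ring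
        rw [this, hA _ _ hne, hprev p (by omega)]
      have hread2 : r.1 ((ki : Int) - 1) ((p + 1 : Nat) : Int) = prev.getD (p + 1) 0 := by
        have hne : (ki : Int) - 1 ≠ (ki : Int) := by omega
        rw [hA _ _ hne, hprev (p + 1) (by omega)]
      have hread3 : r.1 (ki : Int) (((p + 1 : Nat) : Int) - 1)
          = (newRow (Xp.getD (ki - 1) "") Y prev).getD p 0 := by
        have : (((p + 1 : Nat) : Int) - 1) = ((p : Nat) : Int) := by push_cast; ring
        rw [this, hB p (by omega)]
      have hrec := newRow_getD_succ (Xp.getD (ki - 1) "") Y prev hlen p hpY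
      unfold lcsInner
      rw [if_neg (by push_cast; omega : ¬(((ki : Nat) : Int) = 0 ∨ ((p + 1 : Nat) : Int) = 0)),
        hxi, hyj]
      by_cases hx : Xp.getD (ki - 1) "" = Y[p]
      · rw [if_pos hx]
        refine ⟨?_, ?_, ?_⟩
        · intro i' j' hne
          exact (lcsUpd_ne (fun hh => hne hh.1)).trans (hA _ _ hne)
        · intro j hj
          by_cases hje : j = p + 1
          · subst hje
            exact lcsUpd_same.trans (by rw [hread1, hrec, if_pos hx])
          · have hjlt : j < p + 1 := by omega
            have hne2 : ((j : Nat) : Int) ≠ ((p + 1 : Nat) : Int) := by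
              push_cast; omega
            exact (lcsUpd_ne (fun hh => hne2 hh.2)).trans (hB j hjlt)
        · show r.1 ((ki : Int) - 1) (((p + 1 : Nat) : Int) - 1) + 1
              = if p + 1 + 1 = 0 then 0
                else (newRow (Xp.getD (ki - 1) "") Y prev).getD (p + 1 + 1 - 1) 0
          rw [if_neg (by omega : ¬ p + 1 + 1 = 0),
            show p + 1 + 1 - 1 = p + 1 from by omega, hread1, hrec, if_pos hx]
      · rw [if_neg hx]
        refine ⟨?_, ?_, ?_⟩
        · intro i' j' hne
          exact (lcsUpd_ne (fun hh => hne hh.1)).trans (hA _ _ hne)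
        · intro j hj
          by_cases hje : j = p + 1
          · subst hje
            exact lcsUpd_same.trans (by rw [hread2, hread3, hrec, if_neg hx])
          · have hjlt : j < p + 1 := by omega
            have hne2 : ((j : Nat) : Int) ≠ ((p + 1 : Nat) : Int) := by
              push_cast; omega
            exact (lcsUpd_ne (fun hh => hne2 hh.2)).trans (hB j hjlt)
        · show max (r.1 ((ki : Int) - 1) ((p + 1 : Nat) : Int))
              (r.1 ((ki : Int)) (((p + 1 : Nat) : Int) - 1))
              = if p + 1 + 1 = 0 then 0
                else (newRow (Xp.getD (ki - 1) "") Y prev).getD (p + 1 + 1 - 1) 0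
          rw [if_neg (by omega : ¬ p + 1 + 1 = 0),
            show p + 1 + 1 - 1 = p + 1 from by omega, hread2, hread3, hrec, if_neg hx]

-- the inner loop for row i = 0 writes zeros and leaves cur_val = 0
lemma inner_zero (Xp Y : List String) (t0 : Int → Int → Int) :
    ∀ jc : Nat,
      (∀ i' j' : Int, i' ≠ 0 →
        ((PySem.List.pyRange 0 (jc : Int)).foldl (lcsInner Xp Y 0) (t0, 0)).1 i' j' = t0 i' j') ∧
      (∀ j : Nat, j < jc →
        ((PySem.List.pyRange 0 (jc : Int)).foldl (lcsInner Xp Y 0) (t0, 0)).1 0 (j : Int) = 0) ∧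
      ((PySem.List.pyRange 0 (jc : Int)).foldl (lcsInner Xp Y 0) (t0, 0)).2 = 0 := by
  intro jc
  induction jc with
  | zero =>
    rw [PySem.List.pyRange_one_eq_nil (by norm_num)]
    exact ⟨fun _ _ _ => rfl, fun j hj => absurd hj (by omega), rfl⟩
  | succ q ih =>
    have hcast : ((q + 1 : Nat) : Int) = (q : Int) + 1 := by push_cast; ring
    rw [hcast, PySem.List.pyRange_one_succ_right (by positivity), List.foldl_append]
    obtain ⟨hA, hB, hC⟩ := ih
    simp only [List.foldl_cons, List.foldl_nil]
    unfold lcsInner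
    rw [if_pos (Or.inl rfl)]
    refine ⟨?_, ?_, rfl⟩
    · intro i' j' hne
      exact (lcsUpd_ne (fun hh => hne hh.1)).trans (hA _ _ hne)
    · intro j hj
      by_cases hje : j = q
      · subst hje; exact lcsUpd_same
      · have hne2 : ((j : Nat) : Int) ≠ ((q : Nat) : Int) := by omega
        exact (lcsUpd_ne (fun hh => hne2 hh.2)).trans (hB j (by omega))

-- the outer loop: table rows agree with rowsA on prefixes, max_val is the last row's last entry
lemma outer_loop (Xp Y : List String) (replaces : Int) :
    ∀ nc : Nat, nc ≤ Xp.length + 1 →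
      (∀ k : Nat, k < nc → ∀ j : Nat, j ≤ Y.length →
        ((PySem.List.pyRange 0 (nc : Int)).foldl (lcsOuter Xp Y replaces)
            ((fun _ _ => 0), 0, 0)).1 (k : Int) (j : Int)
          = (rowsA Y (Xp.take k)).getD j 0) ∧
      ((PySem.List.pyRange 0 (nc : Int)).foldl (lcsOuter Xp Y replaces)
          ((fun _ _ => 0), 0, 0)).2.1
        = (if nc = 0 then 0 else (rowsA Y (Xp.take (nc - 1))).getD Y.length 0) := by
  intro nc
  induction nc with
  | zero =>
    intro _
    rw [PySem.List.pyRange_one_eq_nil (by norm_num)]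
    exact ⟨fun k hk => absurd hk (by omega), rfl⟩
  | succ q ih =>
    intro hq1
    obtain ⟨hA, hB⟩ := ih (by omega)
    have hcast : ((q + 1 : Nat) : Int) = (q : Int) + 1 := by push_cast; ring
    rw [hcast, PySem.List.pyRange_one_succ_right (by positivity), List.foldl_append]
    set st := (PySem.List.pyRange 0 (q : Int)).foldl (lcsOuter Xp Y replaces)
      ((fun _ _ => 0), 0, 0) with hst
    simp only [List.foldl_cons, List.foldl_nil]
    cases Nat.eq_zero_or_pos q with
    | inl hq0 =>
      subst hq0
      obtain ⟨zA, zB, zC⟩ := inner_zero Xp Y st.1 (Y.length + 1)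
      rw [show ((Y.length + 1 : Nat) : Int) = (Y.length : Int) + 1 by push_cast; ring] at zB zC
      constructor
      · intro k hk j hj
        have hk0 : k = 0 := by omega
        subst hk0
        rw [lcsOuter_fst]
        have := zB j (by omega)
        simp only [Nat.cast_zero] at this ⊢
        rw [this]
        simp [rowsA_nil]
      · rw [lcsOuter_max]
        simp only [Nat.cast_zero]
        rw [zC, hB]
        simp [rowsA_nil]
    | inr hqpos =>
      have hkq : q ≤ Xp.length := by omega
      have hprevlen : (rowsA Y (Xp.take (q - 1))).length = Y.length + 1 := rowsA_length _ _
      have hprev : ∀ j : Nat, j ≤ Y.length →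
          st.1 ((q : Int) - 1) (j : Int) = (rowsA Y (Xp.take (q - 1))).getD j 0 := by
        intro j hj
        have : ((q : Int) - 1) = ((q - 1 : Nat) : Int) := by omega
        rw [this, hA (q - 1) (by omega) j hj]
      obtain ⟨iA, iB, iC⟩ := inner_row Xp Y q hqpos (rowsA Y (Xp.take (q - 1))) hprevlen st.1
        hprev (Y.length + 1) (by omega)
      have hnewrow : newRow (Xp.getD (q - 1) "") Y (rowsA Y (Xp.take (q - 1)))
          = rowsA Y (Xp.take q) := by
        have : q - 1 + 1 = q := by omega
        rw [← rowsA_take_succ Y Xp (q - 1) (by omega), this]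
      rw [show ((Y.length + 1 : Nat) : Int) = (Y.length : Int) + 1 by push_cast; ring] at iA iB iC
      constructor
      · intro k hk j hj
        rw [lcsOuter_fst]
        by_cases hke : k = q
        · subst hke
          rw [iB j (by omega), hnewrow]
        · have hne : ((k : Nat) : Int) ≠ ((q : Nat) : Int) := by omega
          rw [iA _ _ hne, hA k (by omega) j hj]
      · rw [lcsOuter_max, iC]
        simp only [if_neg (by omega : ¬ Y.length + 1 = 0)]
        rw [hB, if_neg (by omega : ¬ q = 0), hnewrow]
        have hmono := newRow_mono (Xp.getD (q - 1) "") Y (rowsA Y (Xp.take (q - 1)))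
          hprevlen (rowsA_inv Y (Xp.take (q - 1))) Y.length (le_refl _)
        rw [hnewrow] at hmono
        have hsimp : Y.length + 1 - 1 = Y.length := by omega
        rw [hsimp]
        simp only [if_neg (by omega : ¬ q + 1 = 0)]
        have : q + 1 - 1 = q := by omega
        rw [this]
        omega

-- A's result is the last entry of the last DP row
lemma a_eq_rowsA (X Y : List String) (replaces : Int) :
    longest_common_sequence_with_wildcard X Y replaces
      = (rowsA Y (add_wildcard_words X Y replaces)).getD Y.length 0 := by
  unfold longest_common_sequence_with_wildcard
  set Xw := add_wildcard_words X Y replaces with hXw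
  obtain ⟨_, hB⟩ := outer_loop Xw Y replaces (Xw.length + 1) (le_refl _)
  rw [show ((Xw.length + 1 : Nat) : Int) = (Xw.length : Int) + 1 by push_cast; ring] at hB
  simp only at hB ⊢
  rw [hB, if_neg (by omega : ¬ Xw.length + 1 = 0)]
  have hsimp : Xw.length + 1 - 1 = Xw.length := by omega
  rw [hsimp, List.take_length]

-- the DP rows compute the pure recursion Lrec
lemma rowsA_eq_Lrec (Xw Y : List String) :
    ∀ i : Nat, i ≤ Xw.length → ∀ j : Nat, j ≤ Y.length →
      (rowsA Y (Xw.take i)).getD j 0 = Lrec Xw Y i j := by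
  intro i
  induction i with
  | zero =>
    intro _ j _
    simp [rowsA_nil, Lrec_left_zero]
  | succ q ih =>
    intro hi j hj
    rw [rowsA_take_succ Y Xw q (by omega)]
    induction j with
    | zero =>
      rw [newRow_getD_zero, Lrec_right_zero]
    | succ p ihp =>
      have hpY : p < Y.length := by omega
      rw [newRow_getD_succ _ _ _ (rowsA_length _ _) p hpY]
      have hY : Y[p] = Y.getD p "" := by
        rw [List.getD_eq_getElem?_getD, List.getElem?_eq_getElem hpY]; rfl
      rw [hY, ih (by omega) p (by omega), ih (by omega) (p + 1) (by omega), ihp (by omega)]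
      simp [Lrec]

-- ---- B side: the stack machine computes Lrec ----

lemma Lrec_succ_succ (Xw Y : List String) (i j : Nat) :
    Lrec Xw Y (i + 1) (j + 1) =
      if Xw.getD i "" = Y.getD j "" then Lrec Xw Y i j + 1
      else max (Lrec Xw Y i (j + 1)) (Lrec Xw Y (i + 1) j) := by
  rw [Lrec]

lemma pyGetD_pred (l : List String) (i : Nat) (hi : i ≠ 0) :
    PySem.List.pyGetD l ((i : Int) - 1) "" = l.getD (i - 1) "" := by
  have : ((i : Int) - 1) = ((i - 1 : Nat) : Int) := by omega
  rw [this, PySem.List.pyGetD_natCast]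

def GoodMemo (Xw Y : List String) (M : PySem.Dict (Nat × Nat) Int) : Prop :=
  ∀ i j v, M.get? (i, j) = some v → v = Lrec Xw Y i j

def ChildOK (M : PySem.Dict (Nat × Nat) Int) (seen : List (Nat × Nat)) (c : Nat × Nat) : Prop :=
  (M.get? c).isSome = true ∨ c ∈ seen

def OkStack (Xw Y : List String) (M : PySem.Dict (Nat × Nat) Int) :
    List (Nat × Nat × Bool) → List (Nat × Nat) → Prop
  | [], _ => True
  | (i, j, r) :: rest, seen =>
      (r = true → i ≠ 0 → j ≠ 0 →
        (if Xw.getD (i - 1) "" = Y.getD (j - 1) "" then ChildOK M seen (i - 1, j - 1)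
         else ChildOK M seen (i - 1, j) ∧ ChildOK M seen (i, j - 1)))
      ∧ OkStack Xw Y M rest ((i, j) :: seen)

lemma okStack_weaken (Xw Y : List String) (M M' : PySem.Dict (Nat × Nat) Int)
    (stack : List (Nat × Nat × Bool)) :
    ∀ seen seen' : List (Nat × Nat),
      (∀ c, ChildOK M seen c → ChildOK M' seen' c) →
      OkStack Xw Y M stack seen → OkStack Xw Y M' stack seen' := by
  induction stack with
  | nil => intro _ _ _ _; trivial
  | cons f rest ih =>
    obtain ⟨i, j, r⟩ := f
    intro seen seen' h hok
    obtain ⟨h1, h2⟩ := hok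
    refine ⟨?_, ?_⟩
    · intro hr hi hj
      have hc := h1 hr hi hj
      by_cases hx : Xw.getD (i - 1) "" = Y.getD (j - 1) ""
      · rw [if_pos hx] at hc ⊢
        exact h _ hc
      · rw [if_neg hx] at hc ⊢
        exact ⟨h _ hc.1, h _ hc.2⟩
    · refine ih ((i, j) :: seen) ((i, j) :: seen') ?_ h2
      intro c hc
      rcases hc with hm | hs
      · rcases h c (Or.inl hm) with hm' | hs'
        · exact Or.inl hm'
        · exact Or.inr (List.mem_cons_of_mem _ hs')
      · rcases List.mem_cons.mp hs with rfl | hs'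
        · exact Or.inr List.mem_cons_self
        · rcases h c (Or.inr hs') with hm' | hs''
          · exact Or.inl hm'
          · exact Or.inr (List.mem_cons_of_mem _ hs'')

lemma get?_insert_isSome (M : PySem.Dict (Nat × Nat) Int) (k k' : Nat × Nat) (v : Int)
    (h : (M.get? k').isSome = true) : ((M.insert k v).get? k').isSome = true := by
  rw [PySem.Dict.get?_insert]
  split_ifs <;> simp_all

lemma childOK_after_insert (M : PySem.Dict (Nat × Nat) Int) (k : Nat × Nat) (v : Int)
    (seen : List (Nat × Nat)) :
    ∀ c, ChildOK M (k :: seen) c → ChildOK (M.insert k v) seen c := by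
  intro c hc
  rcases hc with hm | hs
  · exact Or.inl (get?_insert_isSome M k c v hm)
  · rcases List.mem_cons.mp hs with rfl | hs'
    · exact Or.inl (by rw [PySem.Dict.get?_insert_self]; rfl)
    · exact Or.inr hs'

lemma childOK_absorb (M : PySem.Dict (Nat × Nat) Int) (k : Nat × Nat)
    (seen : List (Nat × Nat)) (hk : (M.get? k).isSome = true) :
    ∀ c, ChildOK M (k :: seen) c → ChildOK M seen c := by
  intro c hc
  rcases hc with hm | hs
  · exact Or.inl hm
  · rcases List.mem_cons.mp hs with rfl | hs'
    · exact Or.inl hk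
    · exact Or.inr hs'

lemma goodMemo_insert (Xw Y : List String) (M : PySem.Dict (Nat × Nat) Int)
    (i j : Nat) (v : Int) (hg : GoodMemo Xw Y M) (hv : v = Lrec Xw Y i j) :
    GoodMemo Xw Y (M.insert (i, j) v) := by
  intro i' j' w hw
  rw [PySem.Dict.get?_insert] at hw
  split_ifs at hw with he
  · simp only [Prod.mk.injEq] at he
    obtain ⟨rfl, rfl⟩ := he
    cases hw
    exact hv
  · exact hg i' j' w hw

lemma loop_ok (Xw Y : List String) :
    ∀ (stack : List (Nat × Nat × Bool)) (M : PySem.Dict (Nat × Nat) Int),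
      GoodMemo Xw Y M → OkStack Xw Y M stack [] →
      GoodMemo Xw Y (lcsLoop Xw Y stack M) ∧
      (∀ k : Nat × Nat,
        ((M.get? k).isSome = true ∨ k ∈ stack.map (fun f => (f.1, f.2.1))) →
        ((lcsLoop Xw Y stack M).get? k).isSome = true) := by
  intro stack M
  induction stack, M using lcsLoop.induct Xw Y with
  | case1 M =>
    intro hg _
    rw [lcsLoop]
    refine ⟨hg, fun k hk => ?_⟩
    rcases hk with h | h
    · exact h
    · simp at h
  | case2 M i j ready rest hmem ih =>
    intro hg hok
    have hstep : lcsLoop Xw Y ((i, j, ready) :: rest) M = lcsLoop Xw Y rest M := by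
      rw [lcsLoop]
      simp [hmem]
    rw [hstep]
    have hok' : OkStack Xw Y M rest [] :=
      okStack_weaken Xw Y M M rest [(i, j)] [] (childOK_absorb M (i, j) [] hmem) hok.2
    obtain ⟨g, p⟩ := ih hg hok'
    refine ⟨g, fun k hk => ?_⟩
    rcases hk with h | h
    · exact p k (Or.inl h)
    · simp only [List.map_cons, List.mem_cons] at h
      rcases h with rfl | h
      · exact p _ (Or.inl hmem)
      · exact p k (Or.inr (by simpa using h))
  | case3 M i j ready rest hmem h0 ih =>
    intro hg hok
    have hstep : lcsLoop Xw Y ((i, j, ready) :: rest) M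
        = lcsLoop Xw Y rest (M.insert (i, j) 0) := by
      rw [lcsLoop]
      simp [hmem, h0]
    rw [hstep]
    have hLv : (0 : Int) = Lrec Xw Y i j := by
      rcases h0 with rfl | rfl
      · rw [Lrec_left_zero]
      · rw [Lrec_right_zero]
    have hg' := goodMemo_insert Xw Y M i j 0 hg hLv
    have hok' : OkStack Xw Y (M.insert (i, j) 0) rest [] :=
      okStack_weaken Xw Y M _ rest [(i, j)] [] (childOK_after_insert M (i, j) 0 []) hok.2
    obtain ⟨g, p⟩ := ih hg' hok'
    refine ⟨g, fun k hk => ?_⟩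
    rcases hk with h | h
    · exact p k (Or.inl (get?_insert_isSome M (i, j) k 0 h))
    · simp only [List.map_cons, List.mem_cons] at h
      rcases h with rfl | h
      · exact p _ (Or.inl (by rw [PySem.Dict.get?_insert_self]; rfl))
      · exact p k (Or.inr (by simpa using h))
  | case4 M i j rest hmem h0 hx ih =>
    intro hg hok
    simp only [not_or] at h0
    obtain ⟨hi, hj⟩ := h0
    have hx' : Xw.getD (i - 1) "" = Y.getD (j - 1) "" := by
      rw [← pyGetD_pred Xw i hi, ← pyGetD_pred Y j hj]
      exact hx
    have hchild := hok.1 rfl hi hj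
    rw [if_pos hx'] at hchild
    have hcs : (M.get? (i - 1, j - 1)).isSome = true := by
      rcases hchild with h | h
      · exact h
      · simp at h
    obtain ⟨v, hv⟩ := Option.isSome_iff_exists.mp hcs
    have hval : (M.get? (i - 1, j - 1)).getD 0 + 1 = Lrec Xw Y i j := by
      rw [hv, Option.getD_some, hg _ _ v hv]
      obtain ⟨i', rfl⟩ := Nat.exists_eq_succ_of_ne_zero hi
      obtain ⟨j', rfl⟩ := Nat.exists_eq_succ_of_ne_zero hj
      simp only [Nat.succ_sub_one, Nat.succ_eq_add_one] at hx' ⊢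
      rw [Lrec_succ_succ, if_pos hx']
    have hstep : lcsLoop Xw Y ((i, j, true) :: rest) M
        = lcsLoop Xw Y rest (M.insert (i, j) ((M.get? (i - 1, j - 1)).getD 0 + 1)) := by
      rw [lcsLoop]
      simp [hmem, hi, hj, hx]
    rw [hstep]
    have hg' := goodMemo_insert Xw Y M i j _ hg hval
    have hok' : OkStack Xw Y (M.insert (i, j) ((M.get? (i - 1, j - 1)).getD 0 + 1)) rest [] :=
      okStack_weaken Xw Y M _ rest [(i, j)] [] (childOK_after_insert M (i, j) _ []) hok.2
    obtain ⟨g, p⟩ := ih hg' hok'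
    refine ⟨g, fun k hk => ?_⟩
    rcases hk with h | h
    · exact p k (Or.inl (get?_insert_isSome M (i, j) k _ h))
    · simp only [List.map_cons, List.mem_cons] at h
      rcases h with rfl | h
      · exact p _ (Or.inl (by rw [PySem.Dict.get?_insert_self]; rfl))
      · exact p k (Or.inr (by simpa using h))
  | case5 M i j rest hmem h0 hx ih =>
    intro hg hok
    simp only [not_or] at h0
    obtain ⟨hi, hj⟩ := h0
    have hx' : ¬ Xw.getD (i - 1) "" = Y.getD (j - 1) "" := by
      rw [← pyGetD_pred Xw i hi, ← pyGetD_pred Y j hj]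
      exact hx
    have hchild := hok.1 rfl hi hj
    rw [if_neg hx'] at hchild
    have hcs1 : (M.get? (i - 1, j)).isSome = true := by
      rcases hchild.1 with h | h
      · exact h
      · simp at h
    have hcs2 : (M.get? (i, j - 1)).isSome = true := by
      rcases hchild.2 with h | h
      · exact h
      · simp at h
    obtain ⟨v1, hv1⟩ := Option.isSome_iff_exists.mp hcs1
    obtain ⟨v2, hv2⟩ := Option.isSome_iff_exists.mp hcs2
    have hval : max ((M.get? (i - 1, j)).getD 0) ((M.get? (i, j - 1)).getD 0)
        = Lrec Xw Y i j := by
      rw [hv1, hv2, Option.getD_some, Option.getD_some, hg _ _ v1 hv1, hg _ _ v2 hv2]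
      obtain ⟨i', rfl⟩ := Nat.exists_eq_succ_of_ne_zero hi
      obtain ⟨j', rfl⟩ := Nat.exists_eq_succ_of_ne_zero hj
      simp only [Nat.succ_sub_one, Nat.succ_eq_add_one] at hx' ⊢
      rw [Lrec_succ_succ, if_neg hx']
    have hstep : lcsLoop Xw Y ((i, j, true) :: rest) M
        = lcsLoop Xw Y rest
            (M.insert (i, j) (max ((M.get? (i - 1, j)).getD 0) ((M.get? (i, j - 1)).getD 0))) := by
      rw [lcsLoop]
      simp [hmem, hi, hj, hx]
    rw [hstep]
    have hg' := goodMemo_insert Xw Y M i j _ hg hval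
    have hok' : OkStack Xw Y
        (M.insert (i, j) (max ((M.get? (i - 1, j)).getD 0) ((M.get? (i, j - 1)).getD 0))) rest [] :=
      okStack_weaken Xw Y M _ rest [(i, j)] [] (childOK_after_insert M (i, j) _ []) hok.2
    obtain ⟨g, p⟩ := ih hg' hok'
    refine ⟨g, fun k hk => ?_⟩
    rcases hk with h | h
    · exact p k (Or.inl (get?_insert_isSome M (i, j) k _ h))
    · simp only [List.map_cons, List.mem_cons] at h
      rcases h with rfl | h
      · exact p _ (Or.inl (by rw [PySem.Dict.get?_insert_self]; rfl))
      · exact p k (Or.inr (by simpa using h))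
  | case6 M i j ready rest hmem h0 hnr hx ih =>
    intro hg hok
    have h0' := h0
    simp only [not_or] at h0'
    obtain ⟨hi, hj⟩ := h0'
    have hx' : Xw.getD (i - 1) "" = Y.getD (j - 1) "" := by
      rw [← pyGetD_pred Xw i hi, ← pyGetD_pred Y j hj]
      exact hx
    have hstep : lcsLoop Xw Y ((i, j, ready) :: rest) M
        = lcsLoop Xw Y ((i - 1, j - 1, false) :: (i, j, true) :: rest) M := by
      rw [lcsLoop]
      simp [hmem, hi, hj, hnr, hx]
    rw [hstep]
    have hok' : OkStack Xw Y M ((i - 1, j - 1, false) :: (i, j, true) :: rest) [] := by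
      refine ⟨fun h => absurd h (by decide), ?_, ?_⟩
      · intro _ _ _
        rw [if_pos hx']
        exact Or.inr List.mem_cons_self
      · refine okStack_weaken Xw Y M M rest [(i, j)] [(i, j), (i - 1, j - 1)] ?_ hok.2
        intro c hc
        rcases hc with hm | hs
        · exact Or.inl hm
        · simp only [List.mem_cons, List.not_mem_nil, or_false] at hs
          exact Or.inr (by simp [hs])
    obtain ⟨g, p⟩ := ih hg hok'
    refine ⟨g, fun k hk => ?_⟩
    rcases hk with h | h
    · exact p k (Or.inl h)
    · simp only [List.map_cons, List.mem_cons] at h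
      refine p k (Or.inr ?_)
      simp only [List.map_cons, List.mem_cons]
      tauto
  | case7 M i j ready rest hmem h0 hnr hx ih =>
    intro hg hok
    have h0' := h0
    simp only [not_or] at h0'
    obtain ⟨hi, hj⟩ := h0'
    have hx' : ¬ Xw.getD (i - 1) "" = Y.getD (j - 1) "" := by
      rw [← pyGetD_pred Xw i hi, ← pyGetD_pred Y j hj]
      exact hx
    have hstep : lcsLoop Xw Y ((i, j, ready) :: rest) M
        = lcsLoop Xw Y ((i, j - 1, false) :: (i - 1, j, false) :: (i, j, true) :: rest) M := by
      rw [lcsLoop]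
      simp [hmem, hi, hj, hnr, hx]
    rw [hstep]
    have hok' : OkStack Xw Y M ((i, j - 1, false) :: (i - 1, j, false) :: (i, j, true) :: rest) [] := by
      refine ⟨fun h => absurd h (by decide), fun h => absurd h (by decide), ?_, ?_⟩
      · intro _ _ _
        rw [if_neg hx']
        constructor
        · exact Or.inr (by simp)
        · exact Or.inr (by simp)
      · refine okStack_weaken Xw Y M M rest [(i, j)]
          [(i, j), (i - 1, j), (i, j - 1)] ?_ hok.2
        intro c hc
        rcases hc with hm | hs
        · exact Or.inl hm
        · simp only [List.mem_cons, List.not_mem_nil, or_false] at hs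
          exact Or.inr (by simp [hs])
    obtain ⟨g, p⟩ := ih hg hok'
    refine ⟨g, fun k hk => ?_⟩
    rcases hk with h | h
    · exact p k (Or.inl h)
    · simp only [List.map_cons, List.mem_cons] at h
      refine p k (Or.inr ?_)
      simp only [List.map_cons, List.mem_cons]
      tauto

-- B's result equals Lrec at (n, m)
lemma b_eq_Lrec (X Y : List String) (replaces : Int) :
    longest_common_sequence_with_wildcard_alt X Y replaces
      = Lrec (add_wildcard_words X Y replaces) Y (add_wildcard_words X Y replaces).length
          Y.length := by
  simp only [longest_common_sequence_with_wildcard_alt]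
  set Xw := add_wildcard_words X Y replaces with hXw
  have hg : GoodMemo Xw Y PySem.Dict.empty := by
    intro i j v hv
    rw [PySem.Dict.get?_empty] at hv
    cases hv
  have hok : OkStack Xw Y PySem.Dict.empty [(Xw.length, Y.length, false)] [] :=
    ⟨fun h => absurd h (by decide), trivial⟩
  obtain ⟨hgood, hpres⟩ := loop_ok Xw Y [(Xw.length, Y.length, false)] PySem.Dict.empty hg hok
  have hmem : ((lcsLoop Xw Y [(Xw.length, Y.length, false)] PySem.Dict.empty).get?
      (Xw.length, Y.length)).isSome = true := by
    apply hpres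
    right
    simp
  obtain ⟨v, hv⟩ := Option.isSome_iff_exists.mp hmem
  rw [hv, Option.getD_some]
  exact hgood _ _ v hv

lemma main_eq (X Y : List String) (replaces : Int) :
    longest_common_sequence_with_wildcard X Y replaces
      = longest_common_sequence_with_wildcard_alt X Y replaces := by
  rw [a_eq_rowsA, b_eq_Lrec]
  have := rowsA_eq_Lrec (add_wildcard_words X Y replaces) Y
    (add_wildcard_words X Y replaces).length (le_refl _) Y.length (le_refl _)
  rw [List.take_length] at this
  exact this

-- ===== VERDICT (by name: the statement is the Claim_ definition above) =====
theorem longest_common_sequence_with_wildcard_spec : Claim_equal_longest_common_sequence_with_wildcard := by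
  intro X Y replaces _
  unfold Spec_longest_common_sequence_with_wildcard
  exact main_eq X Y replaces
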